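-- pv_equiv track=rewrite | github.com/maxi99manuel99/AOC2023 | puzzle12/hot_springs.py | get_remains_from_possible_positions
-- ===== SOURCE A (Python) =====
-- def get_remains_from_possible_positions(springs: str, group: int):
--     """
--     Finds possible positions for a group of given size and returns the remaining spring string
--     if a group were to be placed at that position
--
--     :param springs: The spring string in which we want to find possible positions for our group
--     :param group: the size of the group we want to find positions for
--     """
--     remaining_springs = []
--     i = 0
--     while i < len(springs)-group:
--         if "." not in springs[i:i+group] and springs[i+group] != "#":
--             remaining_springs.append(springs[i+group+1:])
--         if springs[i] == "#":
--             break
--         i += 1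
--
--     return remaining_springs
-- ===== SOURCE B (Python) =====
-- def get_remains_from_possible_positions(springs: str, group: int):
--     """Same result via a backward run-length array and a bounded comprehension (no break, no slice scan)."""
--     n = len(springs)
--     # run[j] = length of the maximal '.'-free run starting at j
--     run = [0] * (n + 1)
--     for j in range(n - 1, -1, -1):
--         run[j] = 0 if springs[j] == "." else run[j + 1] + 1
--     fh = next((j for j, c in enumerate(springs) if c == "#"), None)
--     hi = n - group
--     if fh is not None and fh + 1 < hi:
--         hi = fh + 1
--     return [springs[i + group + 1:] for i in range(hi)
--             if run[i] >= group and springs[i + group] != "#"]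
-- ===== Notes on version B (the rewrite author's own statement) =====
-- stated objective: alternative
-- what changed: Replaces A's while-loop that rescans each window slice for '.' and breaks at the first '#' with a single backward pass building a run-length array plus a first-'#' lookup, then one bounded filter/map comprehension (no break, no per-position slice scan).
-- outside the precondition, e.g. on get_remains_from_possible_positions('x..#', -2): A returns ['..#', '.#'], B returns ['#', '..#', '.#']; on get_remains_from_possible_positions('ab', -1): A raises IndexError, B returns ['ab', 'b', '']
import Mathlib
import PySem

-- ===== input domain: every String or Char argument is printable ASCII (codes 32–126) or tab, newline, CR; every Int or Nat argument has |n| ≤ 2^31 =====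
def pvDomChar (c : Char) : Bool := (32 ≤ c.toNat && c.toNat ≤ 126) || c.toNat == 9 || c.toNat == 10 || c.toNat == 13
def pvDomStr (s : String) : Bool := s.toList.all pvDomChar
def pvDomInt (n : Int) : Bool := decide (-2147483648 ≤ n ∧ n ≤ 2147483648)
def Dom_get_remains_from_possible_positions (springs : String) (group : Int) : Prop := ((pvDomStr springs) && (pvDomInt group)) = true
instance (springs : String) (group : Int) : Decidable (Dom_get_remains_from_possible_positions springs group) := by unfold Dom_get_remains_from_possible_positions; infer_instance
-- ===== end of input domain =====

-- B replaces A's per-position slice scan and break with a backward run-length array plus a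
-- bounded filter/map comprehension (objective: alternative single-pass precomputation).

-- ===== PORT A =====
-- A's while loop: at each i, test the slice springs[i:i+group] for '.', test springs[i+group],
-- append springs[i+group+1:], and break after an i with springs[i] == '#'.
-- pyGet? = none is where the Python raises IndexError; the loop result there is unspecified
-- (those inputs lie outside Pre_), the port just stops with the accumulator.
def pvALoop (cs : List Char) (g : Int) (i : Nat) (acc : List String) : List String :=
  if _h : (i : Int) < (cs.length : Int) - g then
    let acc' :=
      if '.' ∈ PySem.List.slice cs (some (i : Int)) (some ((i : Int) + g)) then acc
      else
        match PySem.List.pyGet? cs ((i : Int) + g) with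
        | none => acc  -- Python: IndexError
        | some c =>
          if c = '#' then acc
          else acc ++ [String.ofList (PySem.List.slice cs (some ((i : Int) + g + 1)) none)]
    match PySem.List.pyGet? cs (i : Int) with
    | none => acc'  -- Python: IndexError
    | some c => if c = '#' then acc' else pvALoop cs g (i + 1) acc'
  else acc
termination_by (((cs.length : Int) - g - (i : Int)).toNat)
decreasing_by omega

def get_remains_from_possible_positions (springs : String) (group : Int) : List String :=
  pvALoop springs.toList group 0 []

-- ===== PORT B =====
-- run[j] = length of the maximal '.'-free run starting at j (Source B's backward loop, recursively)
def pvRun (cs : List Char) : List Int :=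
  match cs with
  | [] => [0]
  | c :: rest => (if c = '.' then 0 else (pvRun rest).headD 0 + 1) :: pvRun rest

-- the comprehension's filter: run[i] >= group and springs[i+group] != '#'
-- (pyGet? = none is Source B's IndexError, unreachable inside Pre_)
def pvCondB (cs : List Char) (g : Int) (i : Int) : Bool :=
  (match PySem.List.pyGet? (pvRun cs) i with
   | some r => decide (g ≤ r)
   | none => false) &&
  (match PySem.List.pyGet? cs (i + g) with
   | some c => decide (c ≠ '#')
   | none => false)

-- the comprehension's element: springs[i+group+1:]
def pvResB (cs : List Char) (g : Int) (i : Int) : String :=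
  String.ofList (PySem.List.slice cs (some (i + g + 1)) none)

-- hi = n - group, capped at (first '#' index) + 1
def pvHi (cs : List Char) (g : Int) : Int :=
  match cs.findIdx? (· = '#') with
  | none => (cs.length : Int) - g
  | some j => if (j : Int) + 1 < (cs.length : Int) - g then (j : Int) + 1 else (cs.length : Int) - g

def get_remains_from_possible_positions_alt (springs : String) (group : Int) : List String :=
  let cs := springs.toList
  ((PySem.List.pyRange 0 (pvHi cs group) 1).filter (pvCondB cs group)).map (pvResB cs group)

-- ===== PRECONDITION & SPEC =====
-- Pre_ restricts to nonnegative group sizes (the function's natural domain): a negative group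
-- drives A's loop past the end of the string and into negative-index wraparound, where A raises
-- IndexError on most inputs and on the rest returns accidental wrapped slices B does not reproduce.
def Pre_get_remains_from_possible_positions (springs : String) (group : Int) : Prop := 0 ≤ group
instance (springs : String) (group : Int) : Decidable (Pre_get_remains_from_possible_positions springs group) := by unfold Pre_get_remains_from_possible_positions; infer_instance

def pvWitness_get_remains_from_possible_positions : String × Int := ("??.?#.", 2)

def Spec_get_remains_from_possible_positions (springs : String) (group : Int) (out : List String) : Prop := out = get_remains_from_possible_positions_alt springs group
instance (springs : String) (group : Int) (out : List String) : Decidable (Spec_get_remains_from_possible_positions springs group out) := by unfold Spec_get_remains_from_possible_positions; infer_instance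

-- ===== CLAIM (what is proved, stated in full; the proofs are below) =====
def Claim_equal_get_remains_from_possible_positions : Prop := ∀ (springs : String) (group : Int), Dom_get_remains_from_possible_positions springs group → Pre_get_remains_from_possible_positions springs group → Spec_get_remains_from_possible_positions springs group (get_remains_from_possible_positions springs group)

-- ===== LEMMAS AND PROOFS =====

-- pvRun reads back: entry i is the length of the '.'-free run starting at position i
lemma pvRun_getElem? (cs : List Char) (i : Nat) (hi : i ≤ cs.length) :
    (pvRun cs)[i]? = some (((cs.drop i).takeWhile (fun c => !(c = '.'))).length : Int) := by
  induction cs generalizing i with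
  | nil =>
    have : i = 0 := by simpa using hi
    subst this; simp [pvRun]
  | cons c rest ih =>
    cases i with
    | zero =>
      have h0 := ih 0 (by omega)
      have hhead : (pvRun rest).headD 0 = ((rest.takeWhile (fun c => !(c = '.'))).length : Int) := by
        cases hr : pvRun rest with
        | nil => simp [hr] at h0
        | cons a t => simp [hr] at h0 ⊢; simpa using h0
      by_cases hc : c = '.'
      · simp [pvRun, hc]
      · simp only [pvRun, hc]
        simp [hc, List.headD] at hhead ⊢
        rw [hhead]
    | succ j =>
      simpa [pvRun] using ih j (by simpa using hi)

-- k ≤ |takeWhile p l| iff the first k elements all satisfy p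
lemma le_takeWhile_iff {α : Type} (p : α → Bool) (l : List α) (k : Nat) (hk : k ≤ l.length) :
    (k ≤ (l.takeWhile p).length) ↔ (∀ x ∈ l.take k, p x = true) := by
  induction l generalizing k with
  | nil => simp_all
  | cons a t ih =>
    cases k with
    | zero => simp
    | succ m =>
      by_cases hp : p a
      · simp [List.takeWhile, hp, ih m (by simpa using hk)]
      · simp [List.takeWhile, hp]

-- hi never exceeds the loop bound n - group
lemma pvHi_le (cs : List Char) (g : Int) : pvHi cs g ≤ (cs.length : Int) - g := by
  cases h : cs.findIdx? (· = '#') with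
  | none => simp only [pvHi, h]; omega
  | some j => simp only [pvHi, h]; split_ifs <;> omega

-- the filter test equals A's two boolean tests at an in-bounds position
lemma pvCondB_eq (cs : List Char) (g : Int) (hg : 0 ≤ g) (i : Nat)
    (h : (i : Int) < (cs.length : Int) - g) (hlen : i + g.toNat < cs.length) :
    pvCondB cs g (i : Int) =
      ((!decide ('.' ∈ (cs.drop i).take g.toNat)) && !decide (cs[i + g.toNat]'hlen = '#')) := by
  have hgt : ((g.toNat : Int)) = g := Int.toNat_of_nonneg hg
  have hi_le : i ≤ cs.length := by omega
  have hrun : PySem.List.pyGet? (pvRun cs) (i : Int) =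
      some (((cs.drop i).takeWhile (fun c => !(c = '.'))).length : Int) := by
    rw [PySem.List.pyGet?_natCast, pvRun_getElem? cs i hi_le]
  have hig : (i : Int) + g = ((i + g.toNat : Nat) : Int) := by push_cast; omega
  have hget : PySem.List.pyGet? cs ((i : Int) + g) = some (cs[i + g.toNat]'hlen) := by
    rw [hig, PySem.List.pyGet?_natCast, List.getElem?_eq_getElem hlen]
  have hk : g.toNat ≤ (cs.drop i).length := by simp; omega
  have h1a : (g ≤ (((cs.drop i).takeWhile (fun c => !(c = '.'))).length : Int)) ↔
      g.toNat ≤ ((cs.drop i).takeWhile (fun c => !(c = '.'))).length := by omega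
  have h1 : (g ≤ (((cs.drop i).takeWhile (fun c => !(c = '.'))).length : Int)) ↔
      ('.' ∉ (cs.drop i).take g.toNat) := by
    rw [h1a, le_takeWhile_iff _ _ _ hk]
    constructor
    · intro hall hmem
      have := hall '.' hmem
      simp at this
    · intro hnm x hx
      simp only [Bool.not_eq_eq_eq_not, Bool.not_true, decide_eq_false_iff_not]
      exact fun hx' => hnm (hx' ▸ hx)
  simp only [pvCondB, hrun, hget]
  have : decide (g ≤ (((cs.drop i).takeWhile (fun c => !(c = '.'))).length : Int)) =
      !decide ('.' ∈ (cs.drop i).take g.toNat) := by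
    rcases Bool.eq_false_or_eq_true (decide ('.' ∈ (cs.drop i).take g.toNat)) with hb | hb <;>
      simp_all
  rw [this]
  congr 1
  simp

-- one step of A's body: the conditional append equals B's filter decision at i
lemma pvAcc'_eq (cs : List Char) (g : Int) (hg : 0 ≤ g) (i : Nat) (acc : List String)
    (h : (i : Int) < (cs.length : Int) - g) (hlen : i + g.toNat < cs.length) :
    (if '.' ∈ PySem.List.slice cs (some (i : Int)) (some ((i : Int) + g)) then acc
     else
       match PySem.List.pyGet? cs ((i : Int) + g) with
       | none => acc
       | some c =>
         if c = '#' then acc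
         else acc ++ [String.ofList (PySem.List.slice cs (some ((i : Int) + g + 1)) none)]) =
    acc ++ (if pvCondB cs g (i : Int) then [pvResB cs g (i : Int)] else []) := by
  have hgt : ((g.toNat : Int)) = g := Int.toNat_of_nonneg hg
  have hslice : PySem.List.slice cs (some (i : Int)) (some ((i : Int) + g)) =
      (cs.drop i).take g.toNat := by
    have := PySem.List.slice_natCast_add cs i g.toNat
    rwa [hgt] at this
  have hig : (i : Int) + g = ((i + g.toNat : Nat) : Int) := by push_cast; omega
  have hget : PySem.List.pyGet? cs ((i : Int) + g) = some (cs[i + g.toNat]'hlen) := by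
    rw [hig, PySem.List.pyGet?_natCast, List.getElem?_eq_getElem hlen]
  rw [hslice, hget, pvCondB_eq cs g hg i h hlen]
  by_cases hd : '.' ∈ (cs.drop i).take g.toNat <;>
    by_cases hc : cs[i + g.toNat]'hlen = '#' <;>
      simp [hd, hc, pvResB]

-- the loop from position i (with no '#' before i) produces B's comprehension from i on
lemma pvALoop_eq (cs : List Char) (g : Int) (hg : 0 ≤ g) :
    ∀ (fuel i : Nat) (acc : List String), cs.length - i ≤ fuel →
      (∀ j (hj : j < cs.length), j < i → cs[j] ≠ '#') →
      pvALoop cs g i acc =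
        acc ++ ((PySem.List.pyRange (i : Int) (pvHi cs g) 1).filter (pvCondB cs g)).map
          (pvResB cs g) := by
  intro fuel
  induction fuel with
  | zero =>
    intro i acc hfuel hinv
    have hile : cs.length ≤ i := by omega
    rw [pvALoop]
    have hend : ¬ ((i : Int) < (cs.length : Int) - g) := by omega
    rw [dif_neg hend]
    rw [PySem.List.pyRange_one_eq_nil (by have := pvHi_le cs g; omega)]
    simp
  | succ fuel ih =>
    intro i acc hfuel hinv
    rw [pvALoop]
    by_cases h : (i : Int) < (cs.length : Int) - g
    · rw [dif_pos h]
      have hgt : ((g.toNat : Int)) = g := Int.toNat_of_nonneg hg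
      have hilen : i < cs.length := by omega
      have hlen : i + g.toNat < cs.length := by omega
      have hgeti : PySem.List.pyGet? cs (i : Int) = some (cs[i]'hilen) := by
        rw [PySem.List.pyGet?_natCast, List.getElem?_eq_getElem hilen]
      rw [pvAcc'_eq cs g hg i acc h hlen, hgeti]
      by_cases hsharp : cs[i]'hilen = '#'
      · simp only [hsharp, if_pos]
        have hfind : cs.findIdx? (· = '#') = some i :=
          List.findIdx?_eq_some_iff_getElem.mpr
            ⟨hilen, by simp [hsharp], fun j hj => by simpa using hinv j (by omega) hj⟩
        have hhi : pvHi cs g = (i : Int) + 1 := by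
          simp only [pvHi, hfind]
          split_ifs <;> omega
        rw [hhi, PySem.List.pyRange_one_singleton]
        cases hb : pvCondB cs g (i : Int) <;> simp [hb]
      · simp only [hsharp]
        have hlt : (i : Int) < pvHi cs g := by
          cases hf : cs.findIdx? (· = '#') with
          | none => simp only [pvHi, hf]; omega
          | some j =>
            obtain ⟨hjlen, hj1, hj2⟩ := List.findIdx?_eq_some_iff_getElem.mp hf
            have hij : i < j := by
              rcases Nat.lt_trichotomy i j with hlt' | heq | hgt'
              · exact hlt'
              · exfalso; apply hsharp; subst heq; simpa using hj1
              · exact absurd (by simpa using hj1) (hinv j hjlen hgt')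
            simp only [pvHi, hf]
            split_ifs <;> omega
        rw [PySem.List.pyRange_one_cons hlt]
        have hinv' : ∀ j (hj : j < cs.length), j < i + 1 → cs[j] ≠ '#' := by
          intro j hj hji
          rcases Nat.lt_succ_iff_lt_or_eq.mp hji with hji' | rfl
          · exact hinv j hj hji'
          · exact hsharp
        have hstep : ((i : Int) + 1) = ((i + 1 : Nat) : Int) := by push_cast; ring
        rw [hstep, ih (i + 1) _ (by omega) hinv']
        cases hb : pvCondB cs g (i : Int) <;> simp [hb]
    · rw [dif_neg h]
      rw [PySem.List.pyRange_one_eq_nil (by have := pvHi_le cs g; omega)]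
      simp

-- ===== VERDICT (by name: the statement is the Claim_ definition above) =====
theorem get_remains_from_possible_positions_spec : Claim_equal_get_remains_from_possible_positions := by
  intro springs group _ hpre
  unfold Spec_get_remains_from_possible_positions get_remains_from_possible_positions
    get_remains_from_possible_positions_alt
  have := pvALoop_eq springs.toList group hpre springs.toList.length 0 []
    (by omega) (by omega)
  simpa using this
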